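-- pv_equiv track=rewrite | github.com/mackorone/exploding-kittens-dictionary | script.py | compute_contributions
-- ===== SOURCE A (Python) =====
-- from typing import Dict, Set
--
-- def compute_contributions(
--     url_to_words: Dict[str, Set[str]], words: Set[str]
-- ) -> Dict[str, int]:
--     url_to_count: Dict[str, int] = {}
--     remaining_urls = set(url_to_words)
--     remaining_words = set(words)
--     while remaining_urls and remaining_words:
--         url_to_remaining_words = {
--             url: (url_to_words[url] & remaining_words) for url in remaining_urls
--         }
--         url, words = max(
--             url_to_remaining_words.items(), key=lambda pair: (len(pair[1]), pair[0])
--         )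
--         url_to_count[url] = len(words)
--         remaining_urls.remove(url)
--         remaining_words -= words
--     return url_to_count
-- ===== SOURCE B (Python) =====
-- def compute_contributions(url_to_words, words):
--     # Inverted-index greedy: keep an integer live-member count per url, maintained by
--     # decrements through a word->urls index as words get covered; no set intersections
--     # or set differences are recomputed per round.
--     pool = set(words)
--     members = {}          # url -> list of its words that are in the pool (static)
--     count = {}            # url -> number of its words still uncovered
--     index = {}            # word -> urls containing it (inverted index)
--     for url, ws in url_to_words.items():
--         mem = [w for w in ws if w in pool]
--         members[url] = mem
--         count[url] = len(mem)
--         for w in mem: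
--             index.setdefault(w, []).append(url)
--     alive = {w: True for w in pool}   # word -> still uncovered?
--     n_alive = len(pool)
--     contributions = {}
--     while count and n_alive:
--         best, url = -1, None
--         for u, c in count.items():
--             if c > best or (c == best and u > url):
--                 best, url = c, u
--         contributions[url] = best
--         for w in members[url]:
--             if alive[w]:
--                 alive[w] = False
--                 n_alive -= 1
--                 for u in index[w]:
--                     if u != url and u in count:
--                         count[u] -= 1
--         del count[url]
--     return contributions
-- ===== Notes on version B (the rewrite author's own statement) =====
-- stated objective: faster
-- what changed: B replaces A's per-round recomputation of every url's set intersection with the remaining pool by an inverted word->urls index built once: each url keeps one integer count of its still-uncovered words, maintained by decrements through the index as picked words die, and each round only scans the integer counts.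
import Mathlib
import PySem

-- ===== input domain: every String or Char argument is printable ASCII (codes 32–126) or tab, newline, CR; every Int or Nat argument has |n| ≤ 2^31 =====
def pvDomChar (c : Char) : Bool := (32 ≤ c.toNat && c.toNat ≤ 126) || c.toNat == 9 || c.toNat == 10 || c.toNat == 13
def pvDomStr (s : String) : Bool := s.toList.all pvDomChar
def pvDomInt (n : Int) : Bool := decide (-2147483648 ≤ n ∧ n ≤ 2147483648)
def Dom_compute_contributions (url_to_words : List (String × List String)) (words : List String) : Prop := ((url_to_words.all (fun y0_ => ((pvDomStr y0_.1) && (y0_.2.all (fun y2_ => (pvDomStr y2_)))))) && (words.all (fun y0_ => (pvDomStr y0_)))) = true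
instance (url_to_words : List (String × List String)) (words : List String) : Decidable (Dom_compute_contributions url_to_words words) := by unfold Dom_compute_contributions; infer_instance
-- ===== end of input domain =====

-- B replaces A's per-round set intersections by an inverted word->urls index with one
-- integer live count per url, decremented as covered words die (objective: faster).

-- ===== PORT A =====
-- max(items, key=lambda pair: (len(pair[1]), pair[0]))
def pvBest (st : List (String × List String)) : Option (String × List String) :=
  PySem.List.max2? st (fun p => (p.2.length : Int)) (fun p => p.1)

-- the while loop; fuel = |remaining_urls| bounds the iterations (one url removed per round)
def computeLoopA (d : PySem.Dict String (List String)) :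
    Nat → List (String × Int) → List String → List String → List (String × Int)
  | 0, acc, _, _ => acc
  | fuel+1, acc, urls, rw =>
    if !urls.isEmpty && !rw.isEmpty then
      let pairs := urls.map (fun u => (u, PySem.Set.inter (d.getD u []) rw))
      match pvBest pairs with
      | some (url, w) =>
          computeLoopA d fuel (acc ++ [(url, (w.length : Int))])
            (PySem.Set.discard urls url) (PySem.Set.diff rw w)
      | none => acc
    else acc

def compute_contributions (url_to_words : List (String × List String)) (words : List String) : List (String × Int) :=
  let d := PySem.Dict.ofList (url_to_words.map (fun p => (p.1, PySem.Set.ofList p.2)))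
  computeLoopA d d.keys.length [] d.keys (PySem.Set.ofList words)

-- ===== PORT B =====
-- best, url = -1, None; for u, c in count.items(): if c > best or (c == best and u > url): …
def bSelect (items : List (String × Int)) : Int × String :=
  items.foldl (fun acc p =>
    if p.2 > acc.1 || (p.2 == acc.1 && decide (acc.2 < p.1)) then (p.2, p.1) else acc) (-1, "")

-- for u in index[w]: if u != url and u in count: count[u] -= 1
def bDec (url : String) (idxw : List String) (count : PySem.Dict String Int) : PySem.Dict String Int :=
  idxw.foldl (fun c u => if !(u == url) && c.contains u then c.modify u 0 (· - 1) else c) count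

-- for w in members[url]: if alive[w]: alive[w] = False; n_alive -= 1; <decrement via index>
def bKill (url : String) (index : PySem.Dict String (List String)) (ms : List String)
    (st : PySem.Dict String Bool × Int × PySem.Dict String Int) :
    PySem.Dict String Bool × Int × PySem.Dict String Int :=
  ms.foldl (fun st w =>
    if st.1.getD w false then
      (st.1.insert w false, st.2.1 - 1, bDec url (index.getD w []) st.2.2)
    else st) st

-- while count and n_alive: …
def bLoop (members index : PySem.Dict String (List String)) :
    Nat → List (String × Int) → PySem.Dict String Int → PySem.Dict String Bool → Int →
    List (String × Int)
  | 0, acc, _, _, _ => acc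
  | fuel+1, acc, count, alive, n =>
    if count.size != 0 && n != 0 then
      let sel := bSelect count.items
      let st := bKill sel.2 index (members.getD sel.2 []) (alive, n, count)
      bLoop members index fuel (acc ++ [(sel.2, sel.1)]) (st.2.2.erase sel.2) st.1 st.2.1
    else acc

def compute_contributions_alt (url_to_words : List (String × List String)) (words : List String) : List (String × Int) :=
  let pool := PySem.Set.ofList words
  let d := PySem.Dict.ofList (url_to_words.map (fun p => (p.1, PySem.Set.ofList p.2)))
  -- build members, count and the inverted index in one pass over the urls
  let st := d.items.foldl (fun st p =>
      let mem := p.2.filter (fun w => PySem.Set.contains pool w)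
      (st.1.insert p.1 mem,
       st.2.1.insert p.1 (mem.length : Int),
       mem.foldl (fun ix w => ix.modify w [] (· ++ [p.1])) st.2.2))
    (PySem.Dict.empty, PySem.Dict.empty, PySem.Dict.empty)
  let alive := PySem.Dict.ofList (pool.map (fun w => (w, true)))
  bLoop st.1 st.2.2 st.2.1.size [] st.2.1 alive (pool.length : Int)

-- ===== PRECONDITION & SPEC =====
def Spec_compute_contributions (url_to_words : List (String × List String)) (words : List String) (out : List (String × Int)) : Prop := out = compute_contributions_alt url_to_words words
instance (url_to_words : List (String × List String)) (words : List String) (out : List (String × Int)) : Decidable (Spec_compute_contributions url_to_words words out) := by unfold Spec_compute_contributions; infer_instance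

-- ===== CLAIM (what is proved, stated in full; the proofs are below) =====
def Claim_equal_compute_contributions : Prop := ∀ (url_to_words : List (String × List String)) (words : List String), Dom_compute_contributions url_to_words words → Spec_compute_contributions url_to_words words (compute_contributions url_to_words words)

-- ===== LEMMAS AND PROOFS =====

-- a dict whose items list is a tabulation over a key list
def mkMap {ν : Type} (ks : List String) (g : String → ν) : PySem.Dict String ν :=
  ⟨ks.map (fun k => (k, g k))⟩

-- the url's word set intersected once with the initial pool ('mem' in Source B)
def pvMem (d : PySem.Dict String (List String)) (pool : List String) (u : String) : List String :=
  (d.getD u []).filter (fun w => PySem.Set.contains pool w)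

def pvAlive (pool rw : List String) : PySem.Dict String Bool :=
  mkMap pool (fun w => decide (w ∈ rw))

def pvCount (d : PySem.Dict String (List String)) (pool urls rw : List String)
    (url : String) (c0 : Int) : PySem.Dict String Int :=
  mkMap urls (fun u => if u = url then c0 else ((PySem.Set.inter (pvMem d pool u) rw).length : Int))

lemma mkMap_congr {ν : Type} (ks : List String) (g g' : String → ν)
    (h : ∀ k ∈ ks, g k = g' k) : mkMap ks g = mkMap ks g' := by
  unfold mkMap
  exact congrArg _ (List.map_congr_left (fun k hk => by rw [h k hk]))

lemma mkMap_getD {ν : Type} (ks : List String) (g : String → ν) (u : String) (dflt : ν) :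
    u ∈ ks → (mkMap ks g).getD u dflt = g u := by
  induction ks with
  | nil => intro hu; cases hu
  | cons k ks ih =>
    intro hu
    by_cases hk : k = u
    · subst hk
      simp [mkMap, PySem.Dict.getD, PySem.Dict.get?]
    · have hu' : u ∈ ks := by
        rcases List.mem_cons.1 hu with h | h
        · exact absurd h.symm hk
        · exact h
      have := ih hu'
      simpa [mkMap, PySem.Dict.getD, PySem.Dict.get?, hk] using this

lemma mkMap_contains {ν : Type} (ks : List String) (g : String → ν) (x : String) :
    (mkMap ks g).contains x = ks.contains x := by
  induction ks with
  | nil => rfl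
  | cons k ks ih =>
    simp only [mkMap, PySem.Dict.contains, PySem.Dict.items, List.map_cons, List.any_cons,
      List.contains_cons] at *
    rw [ih, Bool.beq_comm]

lemma mkMap_insert {ν : Type} (ks : List String) (g : String → ν) (u : String) (v : ν)
    (hu : u ∈ ks) : (mkMap ks g).insert u v = mkMap ks (fun x => if x = u then v else g x) := by
  have hc : (mkMap ks g).contains u = true := by
    rw [mkMap_contains]; exact List.contains_iff_mem.2 hu
  rw [PySem.Dict.insert, if_pos hc]
  unfold mkMap
  rw [List.map_map]
  congr 1
  apply List.map_congr_left
  intro k _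
  by_cases hk : k = u <;> simp [hk]

lemma mkMap_erase {ν : Type} (ks : List String) (g : String → ν) (u : String) :
    (mkMap ks g).erase u = mkMap (ks.filter (fun x => !(x == u))) g := by
  unfold mkMap PySem.Dict.erase
  simp only [PySem.Dict.items, List.filter_map]
  first
  | rfl
  | (congr 1; exact List.filter_congr (fun x _ => rfl))

lemma mkMap_size {ν : Type} (ks : List String) (g : String → ν) :
    (mkMap ks g).size = ks.length := by
  simp [mkMap, PySem.Dict.size, PySem.Dict.items]

-- a nodup filtered list loses exactly one element
lemma pv_filter_ne_length (l : List String) (w : String) (h : l.Nodup) (hm : w ∈ l) :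
    (l.filter (fun x => !(x == w))).length + 1 = l.length := by
  have hc : l.countP (fun x => x == w) = 1 := by
    have := List.count_eq_one_of_mem h hm
    rwa [List.count] at this
  have h2 := List.length_eq_countP_add_countP (fun x => x == w) (l := l)
  have h3 : (l.filter (fun x => !(x == w))).length = l.countP (fun x => !(x == w)) := by
    rw [List.countP_eq_length_filter]
  have h4 : l.countP (fun a => decide (¬(a == w) = true)) = l.countP (fun x => !(x == w)) := by
    apply List.countP_congr
    intro x _
    simp
  omega

-- the decrement loop: every url in the (nodup) index list loses one, except the picked url
lemma bDec_eq (url : String) (L ks : List String) (g : String → Int) (hL : L.Nodup) :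
    bDec url L (mkMap ks g)
      = mkMap ks (fun u => if u ∈ L ∧ u ≠ url then g u - 1 else g u) := by
  induction L generalizing g with
  | nil =>
    rw [show bDec url [] (mkMap ks g) = mkMap ks g from rfl]
    exact mkMap_congr _ _ _ (fun k _ => by simp)
  | cons u0 L ih =>
    have hL' : L.Nodup := hL.of_cons
    have hu0 : u0 ∉ L := by simp_all [List.nodup_cons]
    simp only [bDec, List.foldl_cons]
    by_cases hcase : (!(u0 == url) && (mkMap ks g).contains u0) = true
    · have hne : u0 ≠ url := by
        simp only [Bool.and_eq_true, Bool.not_eq_true', beq_eq_false_iff_ne] at hcase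
        exact hcase.1
      have hmem : u0 ∈ ks := by
        have := hcase
        simp only [Bool.and_eq_true, mkMap_contains, List.contains_eq_mem,
          decide_eq_true_eq] at this
        exact this.2
      have hmod : (mkMap ks g).modify u0 0 (· - 1)
          = mkMap ks (fun x => if x = u0 then g u0 - 1 else g x) := by
        rw [PySem.Dict.modify, mkMap_getD ks g u0 0 hmem, mkMap_insert ks g u0 _ hmem]
      rw [if_pos hcase, hmod]
      rw [show ∀ st : PySem.Dict String Int, List.foldl
        (fun c u => if !(u == url) && c.contains u then c.modify u 0 (· - 1) else c) st L = bDec url L st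
        from fun _ => rfl]
      rw [ih _ hL']
      apply mkMap_congr
      intro k _
      by_cases hk : k = u0
      · subst hk
        have hcl : ¬ (k ∈ L ∧ k ≠ url) := fun hc => hu0 hc.1
        simp [hcl, hne, hu0]
      · have hiff : (k ∈ u0 :: L ∧ k ≠ url) ↔ (k ∈ L ∧ k ≠ url) := by
          constructor
          · rintro ⟨h3, h4⟩; exact ⟨(List.mem_cons.1 h3).resolve_left hk, h4⟩
          · rintro ⟨h3, h4⟩; exact ⟨List.mem_cons_of_mem _ h3, h4⟩
        by_cases h2 : k ∈ L ∧ k ≠ url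
        · rw [if_pos h2, if_pos (hiff.2 h2)]
          simp [hk]
        · rw [if_neg h2, if_neg (fun hc => h2 (hiff.1 hc))]
          simp [hk]
    · rw [if_neg (by simp [hcase])]
      rw [show ∀ st : PySem.Dict String Int, List.foldl
        (fun c u => if !(u == url) && c.contains u then c.modify u 0 (· - 1) else c) st L = bDec url L st
        from fun _ => rfl]
      rw [ih _ hL']
      apply mkMap_congr
      intro k hkks
      have hnot : ¬ (u0 ≠ url ∧ u0 ∈ ks) := by
        intro hcon
        simp [hcon.1, hcon.2, mkMap_contains, List.contains_eq_mem] at hcase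
      by_cases hk : k = u0
      · subst hk
        have hkurl : k = url := by
          by_contra h3
          exact hnot ⟨h3, hkks⟩
        simp [hkurl]
      · have hiff : (k ∈ u0 :: L ∧ k ≠ url) ↔ (k ∈ L ∧ k ≠ url) := by
          constructor
          · rintro ⟨h3, h4⟩; exact ⟨(List.mem_cons.1 h3).resolve_left hk, h4⟩
          · rintro ⟨h3, h4⟩; exact ⟨List.mem_cons_of_mem _ h3, h4⟩
        by_cases h2 : k ∈ L ∧ k ≠ url
        · rw [if_pos h2, if_pos (hiff.2 h2)]
        · rw [if_neg h2, if_neg (fun hc => h2 (hiff.1 hc))]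

-- the fold state of Python's max over (len, name) keys
def maxStep (m x : String × List String) : String × List String :=
  if m.2.length < x.2.length ∨ (¬ x.2.length < m.2.length ∧ m.1 < x.1) then x else m

-- the step function of Python's max at our two keys
def pvM2Step (acc : Option (String × List String)) (x : String × List String) :
    Option (String × List String) :=
  match acc with
  | none => some x
  | some m =>
    if (decide ((m.2.length : Int) < (x.2.length : Int)) ||
        !decide ((x.2.length : Int) < (m.2.length : Int)) && decide (m.1 < x.1)) = true
    then some x else some m

lemma pvBest_eq_foldl (l : List (String × List String)) :
    pvBest l = l.foldl pvM2Step none := by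
  unfold pvBest PySem.List.max2?
  apply PySem.List.foldl_congr_mem
  intro acc x _
  cases acc <;> rfl

lemma pvM2_step (q x : String × List String) : pvM2Step (some q) x = some (maxStep q x) := by
  show (if (decide ((q.2.length : Int) < (x.2.length : Int)) ||
      !decide ((x.2.length : Int) < (q.2.length : Int)) && decide (q.1 < x.1)) = true
      then some x else some q) = some (maxStep q x)
  unfold maxStep
  rcases lt_trichotomy q.2.length x.2.length with h1 | h1 | h1
  · simp [Nat.cast_lt, h1, Nat.lt_asymm h1]
  · have h2 : ¬ q.2.length < x.2.length := by omega
    have h3 : ¬ x.2.length < q.2.length := by omega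
    by_cases h4 : q.1 < x.1 <;> simp [Nat.cast_lt, h2, h3, h4]
  · have h2 : ¬ q.2.length < x.2.length := by omega
    simp [Nat.cast_lt, h1, h2]

lemma pvM2_some (l : List (String × List String)) :
    ∀ q, l.foldl pvM2Step (some q) = some (l.foldl maxStep q) := by
  induction l with
  | nil => intro q; rfl
  | cons x l ih =>
    intro q
    rw [List.foldl_cons, List.foldl_cons, pvM2_step]
    exact ih (maxStep q x)

lemma maxStep_mem (l : List (String × List String)) (q : String × List String) :
    l.foldl maxStep q ∈ q :: l := by
  induction l generalizing q with
  | nil => exact List.mem_cons_self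
  | cons x l ih =>
    rw [List.foldl_cons]
    rcases List.mem_cons.1 (ih (maxStep q x)) with h | h
    · rw [h]
      unfold maxStep
      split
      · exact List.mem_cons_of_mem _ List.mem_cons_self
      · exact List.mem_cons_self
    · exact List.mem_cons_of_mem _ (List.mem_cons_of_mem _ h)

lemma pvBest_cons (q : String × List String) (l : List (String × List String)) :
    pvBest (q :: l) = some (l.foldl maxStep q) := by
  rw [pvBest_eq_foldl, List.foldl_cons]
  exact pvM2_some l q

lemma bSel_aux (l : List (String × List String)) :
    ∀ q : String × List String,
    (l.map (fun p => (p.1, (p.2.length : Int)))).foldl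
      (fun acc p => if (p.2 > acc.1 || (p.2 == acc.1 && decide (acc.2 < p.1))) = true
        then (p.2, p.1) else acc) (((q.2.length : Int)), q.1)
      = (((l.foldl maxStep q).2.length : Int), (l.foldl maxStep q).1) := by
  induction l with
  | nil => intro q; rfl
  | cons x l ih =>
    intro q
    rw [List.map_cons, List.foldl_cons, List.foldl_cons]
    have hstep : (if (((x.2.length : Int) > (q.2.length : Int)) ||
        (((x.2.length : Int) == (q.2.length : Int)) && decide (q.1 < x.1))) = true
        then ((x.2.length : Int), x.1) else ((q.2.length : Int), q.1))
        = (((maxStep q x).2.length : Int), (maxStep q x).1) := by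
      unfold maxStep
      rcases lt_trichotomy q.2.length x.2.length with h1 | h1 | h1
      · simp [Nat.cast_lt, h1, Nat.lt_asymm h1]
      · have h2 : ¬ q.2.length < x.2.length := by omega
        have h3 : ¬ x.2.length < q.2.length := by omega
        have h4 : ((x.2.length : Int) == (q.2.length : Int)) = true := by
          simp
          omega
        by_cases h5 : q.1 < x.1 <;> simp [Nat.cast_lt, h2, h3, h4, h5]
      · have h2 : ¬ (q.2.length : Int) < (x.2.length : Int) := by
          simp [Nat.cast_lt]
          omega
        have h3 : ((x.2.length : Int) == (q.2.length : Int)) = false := by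
          simp
          omega
        have h4 : ¬ q.2.length < x.2.length := by omega
        simp [h1, h2, h3, h4]
    dsimp only
    rw [hstep]
    exact ih (maxStep q x)

lemma bSelect_cons_map (q : String × List String) (l : List (String × List String)) :
    bSelect ((q :: l).map (fun p => (p.1, (p.2.length : Int))))
      = (((l.foldl maxStep q).2.length : Int), (l.foldl maxStep q).1) := by
  unfold bSelect
  rw [List.map_cons, List.foldl_cons]
  have hq : ((-1 : Int) < (q.2.length : Int)) := by omega
  convert bSel_aux l q using 2
  all_goals simp [hq]

-- killing the picked url's still-alive words = filtering them out of the pool,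
-- with counts maintained through the inverted index
lemma bKill_eq (d : PySem.Dict String (List String)) (pool urls0 urls : List String)
    (index : PySem.Dict String (List String)) (url : String) (c0 : Int)
    (hnd0 : urls0.Nodup)
    (hidx : ∀ w, index.getD w [] = urls0.filter (fun u => decide (w ∈ pvMem d pool u)))
    (hurls : ∀ u ∈ urls, u ∈ urls0)
    (hmemnd : ∀ u, (pvMem d pool u).Nodup) :
    ∀ (ms rw : List String), (∀ w ∈ ms, w ∈ pool) → rw.Nodup →
    bKill url index ms (pvAlive pool rw, (rw.length : Int), pvCount d pool urls rw url c0)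
      = (pvAlive pool (rw.filter (fun w => decide (w ∉ ms))),
         ((rw.filter (fun w => decide (w ∉ ms))).length : Int),
         pvCount d pool urls (rw.filter (fun w => decide (w ∉ ms))) url c0) := by
  intro ms
  induction ms with
  | nil =>
    intro rw _ _
    simp [bKill]
  | cons w0 ms ih =>
    intro rw hms hrw
    have hw0pool : w0 ∈ pool := hms w0 List.mem_cons_self
    have hmspool : ∀ w ∈ ms, w ∈ pool := fun w hw => hms w (List.mem_cons_of_mem _ hw)
    simp only [bKill, List.foldl_cons]
    have hget : (pvAlive pool rw).getD w0 false = decide (w0 ∈ rw) :=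
      mkMap_getD pool _ w0 false hw0pool
    by_cases h0 : w0 ∈ rw
    · -- the word is still alive: flip it, decrement, recurse on the shrunk pool
      simp only [hget, h0, decide_true, if_true]
      set rw2 := rw.filter (fun x => !(x == w0)) with hrw2
      have halive : (pvAlive pool rw).insert w0 false = pvAlive pool rw2 := by
        rw [pvAlive, mkMap_insert pool _ w0 false hw0pool]
        apply mkMap_congr
        intro k _
        by_cases hk : k = w0 <;> simp [hrw2, hk, List.mem_filter]
      have hlen : ((rw.length : Int) - 1) = (rw2.length : Int) := by
        have := pv_filter_ne_length rw w0 hrw h0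
        rw [hrw2]
        omega
      have hcount : bDec url (index.getD w0 []) (pvCount d pool urls rw url c0)
          = pvCount d pool urls rw2 url c0 := by
        rw [hidx w0]
        rw [show pvCount d pool urls rw url c0 = mkMap urls _ from rfl]
        rw [bDec_eq url _ urls _ (hnd0.filter _)]
        apply mkMap_congr
        intro u hu
        by_cases hurl : u = url
        · simp [pvCount, hurl]
        · have hmemu : u ∈ urls0 := hurls u hu
          simp only [pvCount, hurl, if_false, List.mem_filter, hmemu, true_and,
            decide_eq_true_eq]
          by_cases hw0u : w0 ∈ pvMem d pool u
          · have hcond : (w0 ∈ pvMem d pool u) ∧ u ≠ url := ⟨hw0u, hurl⟩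
            simp only [hcond, hw0u, hurl, ne_eq, not_false_iff, and_self, if_true]
            -- |inter (mem u) rw2| = |inter (mem u) rw| - 1
            have hfilter : PySem.Set.inter (pvMem d pool u) rw2
                = (PySem.Set.inter (pvMem d pool u) rw).filter (fun x => !(x == w0)) := by
              simp only [PySem.Set.inter, PySem.Set.contains, hrw2, List.filter_filter]
              apply List.filter_congr
              intro x _
              by_cases hx : x = w0 <;> simp [hx, List.contains_eq_mem, h0]
            have hw0in : w0 ∈ PySem.Set.inter (pvMem d pool u) rw := by
              simp [PySem.Set.inter, List.mem_filter, hw0u, PySem.Set.contains,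
                List.contains_eq_mem, h0]
            have hnd : (PySem.Set.inter (pvMem d pool u) rw).Nodup :=
              (hmemnd u).filter _
            have := pv_filter_ne_length (PySem.Set.inter (pvMem d pool u) rw) w0 hnd hw0in
            rw [hfilter]
            omega
          · have hcond : ¬ ((w0 ∈ pvMem d pool u) ∧ u ≠ url) := fun hc => hw0u hc.1
            simp only [hcond, hw0u, false_and, if_false]
            congr 2
            simp only [PySem.Set.inter, hrw2, PySem.Set.contains, List.filter_filter]
            apply List.filter_congr
            intro x hx
            have : x ≠ w0 := fun hxe => hw0u (hxe ▸ hx)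
            by_cases hxr : x ∈ rw <;>
              simp [List.contains_eq_mem, List.mem_filter, this, hxr]
      rw [show List.foldl (fun st w => if st.1.getD w false = true then
          (st.1.insert w false, st.2.1 - 1, bDec url (index.getD w []) st.2.2) else st) _ ms
          = bKill url index ms _ from rfl]
      rw [halive, hlen, hcount, ih rw2 hmspool (hrw.filter _)]
      have : rw2.filter (fun w => decide (w ∉ ms)) = rw.filter (fun w => decide (w ∉ w0 :: ms)) := by
        rw [hrw2, List.filter_filter]
        apply List.filter_congr
        intro x _
        by_cases hx : x = w0
        · simp [hx]
        · simp [hx]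
      rw [this]
    · -- already covered: nothing happens
      simp only [hget, h0, decide_false, Bool.false_eq_true, if_false]
      rw [show List.foldl (fun st w => if st.1.getD w false = true then
          (st.1.insert w false, st.2.1 - 1, bDec url (index.getD w []) st.2.2) else st) _ ms
          = bKill url index ms _ from rfl]
      rw [ih rw hmspool hrw]
      have : rw.filter (fun w => decide (w ∉ ms)) = rw.filter (fun w => decide (w ∉ w0 :: ms)) := by
        apply List.filter_congr
        intro x hx
        have : x ≠ w0 := fun hxe => h0 (hxe ▸ hx)
        simp [this]
      rw [this]

-- the main loop correspondence
lemma bLoop_eq (d : PySem.Dict String (List String)) (pool urls0 : List String)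
    (members index : PySem.Dict String (List String))
    (hnd0 : urls0.Nodup)
    (hmem : ∀ u ∈ urls0, members.getD u [] = pvMem d pool u)
    (hidx : ∀ w, index.getD w [] = urls0.filter (fun u => decide (w ∈ pvMem d pool u)))
    (hmemnd : ∀ u, (pvMem d pool u).Nodup) :
    ∀ (fuel : Nat) (acc : List (String × Int)) (urls rw : List String),
      (∀ u ∈ urls, u ∈ urls0) → rw.Nodup → (∀ w ∈ rw, w ∈ pool) →
      bLoop members index fuel acc
        (mkMap urls (fun u => ((PySem.Set.inter (pvMem d pool u) rw).length : Int)))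
        (pvAlive pool rw) ((rw.length : Int))
        = computeLoopA d fuel acc urls rw := by
  intro fuel
  induction fuel with
  | zero => intro acc urls rw _ _ _; rfl
  | succ n ih =>
    intro acc urls rw hurls hrwnd hrwpool
    simp only [bLoop, computeLoopA, mkMap_size]
    by_cases hcond : urls ≠ [] ∧ rw ≠ []
    · obtain ⟨hu, hr⟩ := hcond
      have hbool : ((urls.length != 0) && ((rw.length : Int) != 0)) = true := by
        have h1 : urls.length ≠ 0 := fun he => hu (List.eq_nil_of_length_eq_zero he)
        have h2 : rw.length ≠ 0 := fun he => hr (List.eq_nil_of_length_eq_zero he)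
        have h3 : ((rw.length : Int)) ≠ 0 := by
          intro he
          exact h2 (by exact_mod_cast he)
        simp [h1, h3, hr]
      have hboolA : (!urls.isEmpty && !rw.isEmpty) = true := by
        simp [List.isEmpty_iff, hu, hr]
      rw [hbool, hboolA]
      simp only [if_true]
      obtain ⟨u1, urest, rfl⟩ := List.exists_cons_of_ne_nil hu
      -- A's pairs with the full sets equal the pairs with the pooled sets
      have hpairs : (u1 :: urest).map (fun u => (u, PySem.Set.inter (d.getD u []) rw))
          = (u1 :: urest).map (fun u => (u, PySem.Set.inter (pvMem d pool u) rw)) := by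
        apply List.map_congr_left
        intro u _
        congr 1
        simp only [PySem.Set.inter, pvMem, List.filter_filter]
        apply List.filter_congr
        intro x _
        by_cases hx : x ∈ rw
        · simp [PySem.Set.contains, List.contains_eq_mem, hx, hrwpool x hx]
        · simp [PySem.Set.contains, List.contains_eq_mem, hx]
      rw [hpairs]
      simp only [List.map_cons]
      set m := (urest.map (fun u => (u, PySem.Set.inter (pvMem d pool u) rw))).foldl maxStep
        (u1, PySem.Set.inter (pvMem d pool u1) rw) with hm
      rw [pvBest_cons]
      have hitems : (mkMap (u1 :: urest)
          (fun u => ((PySem.Set.inter (pvMem d pool u) rw).length : Int))).items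
          = ((u1, PySem.Set.inter (pvMem d pool u1) rw)
              :: urest.map (fun u => (u, PySem.Set.inter (pvMem d pool u) rw))).map
            (fun p => (p.1, (p.2.length : Int))) := by
        simp [mkMap, PySem.Dict.items, List.map_map, Function.comp]
      have hsel : bSelect (mkMap (u1 :: urest)
          (fun u => ((PySem.Set.inter (pvMem d pool u) rw).length : Int))).items
          = ((m.2.length : Int), m.1) := by
        rw [hitems]
        exact bSelect_cons_map _ _
      rw [hsel]
      -- the chosen element comes from the pair list
      have hmmem : m ∈ (u1, PySem.Set.inter (pvMem d pool u1) rw)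
          :: urest.map (fun u => (u, PySem.Set.inter (pvMem d pool u) rw)) := maxStep_mem _ _
      have : ∃ u ∈ u1 :: urest, m = (u, PySem.Set.inter (pvMem d pool u) rw) := by
        rcases List.mem_cons.1 hmmem with h | h
        · exact ⟨u1, List.mem_cons_self, h⟩
        · obtain ⟨u, hu', he⟩ := List.mem_map.1 h
          exact ⟨u, List.mem_cons_of_mem _ hu', he.symm⟩
      obtain ⟨url, hurlmem, hmeq⟩ := this
      have hurl0 : url ∈ urls0 := hurls url hurlmem
      rw [hmeq, hm.symm.trans hmeq]
      dsimp only
      rw [hmem url hurl0]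
      -- rewrite the count dict into the pvCount form
      have hcnt : mkMap (u1 :: urest) (fun u => ((PySem.Set.inter (pvMem d pool u) rw).length : Int))
          = pvCount d pool (u1 :: urest) rw url ((PySem.Set.inter (pvMem d pool url) rw).length : Int) := by
        apply mkMap_congr
        intro k _
        by_cases hk : k = url <;> simp [pvCount, hk]
      rw [hcnt]
      have hmspool : ∀ w ∈ pvMem d pool url, w ∈ pool := by
        intro w hw
        simp only [pvMem, List.mem_filter, PySem.Set.contains, List.contains_eq_mem,
          decide_eq_true_eq] at hw
        simpa using hw.2
      rw [bKill_eq d pool urls0 (u1 :: urest) index url _ hnd0 hidx hurls hmemnd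
        (pvMem d pool url) rw hmspool hrwnd]
      dsimp only
      set rw' := rw.filter (fun w => decide (w ∉ pvMem d pool url)) with hrw'
      -- rw' is A's Set.diff rw picked
      have hdiff : PySem.Set.diff rw (PySem.Set.inter (pvMem d pool url) rw) = rw' := by
        simp only [PySem.Set.diff, hrw']
        apply List.filter_congr
        intro x hx
        by_cases hmem' : x ∈ pvMem d pool url <;>
          simp [PySem.Set.contains, List.contains_eq_mem, List.mem_filter, hmem', hx]
      rw [hdiff]
      -- the erased count dict is the next round's tabulation
      have herase : (pvCount d pool (u1 :: urest) rw' url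
            ((PySem.Set.inter (pvMem d pool url) rw).length : Int)).erase url
          = mkMap (PySem.Set.discard (u1 :: urest) url)
            (fun u => ((PySem.Set.inter (pvMem d pool u) rw').length : Int)) := by
        rw [pvCount, mkMap_erase]
        apply mkMap_congr
        intro k hk
        have : k ≠ url := by
          simp only [List.mem_filter, Bool.not_eq_eq_eq_not, Bool.not_true,
            beq_eq_false_iff_ne, ne_eq] at hk
          exact hk.2
        simp [this]
      rw [herase]
      apply ih
      · intro u hu'
        simp only [PySem.Set.discard, List.mem_filter] at hu'
        exact hurls u hu'.1
      · exact hrwnd.filter _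
      · intro w hw
        rw [hrw'] at hw
        exact hrwpool w (List.mem_filter.1 hw).1
    · -- at least one of the two is empty: both loops stop
      push_neg at hcond
      by_cases hu : urls = []
      · have : ((urls.length != 0) && ((rw.length : Int) != 0)) = false := by simp [hu]
        have hA : (!urls.isEmpty && !rw.isEmpty) = false := by simp [hu]
        rw [this, hA]
        simp
      · have hr : rw = [] := hcond hu
        have : ((urls.length != 0) && ((rw.length : Int) != 0)) = false := by simp [hr]
        have hA : (!urls.isEmpty && !rw.isEmpty) = false := by simp [hr]
        rw [this, hA]
        simp

-- membership of pairs of a built dict in the defining list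
lemma pv_mem_items_update {κ ν : Type} [BEq κ] [LawfulBEq κ] (l : List (κ × ν)) :
    ∀ (d : PySem.Dict κ ν) (p : κ × ν), p ∈ (d.update l).items → p ∈ l ∨ p ∈ d.items := by
  induction l with
  | nil => intro d p hd; right; simpa [PySem.Dict.update] using hd
  | cons q l ih =>
    intro d p hd
    simp only [PySem.Dict.update, List.foldl_cons] at hd
    rcases ih (d.insert q.1 q.2) p hd with h | h
    · left; exact List.mem_cons_of_mem _ h
    · rcases (PySem.Dict.mem_items_insert d q.1 q.2 p).1 h with h2 | h2
      · left
        rw [show q = (q.1, q.2) from rfl, ← h2]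
        exact List.mem_cons_self
      · right; exact h2.1

lemma mem_items_ofList {κ ν : Type} [BEq κ] [LawfulBEq κ] (l : List (κ × ν)) (p : κ × ν)
    (hp : p ∈ (PySem.Dict.ofList l).items) : p ∈ l := by
  have := pv_mem_items_update l PySem.Dict.empty p hp
  simpa [PySem.Dict.empty, PySem.Dict.items] using this

theorem pv_main (url_to_words : List (String × List String)) (words : List String) :
    compute_contributions url_to_words words = compute_contributions_alt url_to_words words := by
  unfold compute_contributions compute_contributions_alt
  dsimp only
  set pool := PySem.Set.ofList words with hpool
  set d := PySem.Dict.ofList (url_to_words.map (fun p => (p.1, PySem.Set.ofList p.2))) with hd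
  have hnd0 : d.keys.Nodup := PySem.Dict.nodup_keys_ofList _
  have hpoolnd : pool.Nodup := PySem.Set.nodup_ofList _
  have hvals : ∀ u, (d.getD u []).Nodup := by
    intro u
    rcases h : d.get? u with _ | s
    · simp [PySem.Dict.getD, h]
    · have hmem := PySem.Dict.mem_items_of_get?_eq_some d h
      have := mem_items_ofList _ _ hmem
      obtain ⟨q, _, hq⟩ := List.mem_map.1 this
      have : s = PySem.Set.ofList q.2 := congrArg Prod.snd hq |>.symm
      simp [PySem.Dict.getD, h, this, PySem.Set.nodup_ofList]
  have hmemnd : ∀ u, (pvMem d pool u).Nodup := fun u => (hvals u).filter _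
  have hitems : d.items = d.keys.map (fun k => (k, d.getD k [])) :=
    PySem.Dict.items_eq_map_keys d hnd0 []
  -- build phase: split the triple fold into three independent folds
  rw [show (fun (st : PySem.Dict String (List String) × PySem.Dict String Int ×
        PySem.Dict String (List String)) (p : String × List String) =>
        ((st.1.insert p.1 (p.2.filter (fun w => PySem.Set.contains pool w)),
          st.2.1.insert p.1 ((p.2.filter (fun w => PySem.Set.contains pool w)).length : Int),
          (p.2.filter (fun w => PySem.Set.contains pool w)).foldl
            (fun ix w => ix.modify w [] (· ++ [p.1])) st.2.2)))
      = (fun st p =>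
        ((fun (m : PySem.Dict String (List String)) (p : String × List String) =>
            m.insert p.1 (p.2.filter (fun w => PySem.Set.contains pool w))) st.1 p,
         (fun (pr : PySem.Dict String Int × PySem.Dict String (List String)) (p : String × List String) =>
            (pr.1.insert p.1 ((p.2.filter (fun w => PySem.Set.contains pool w)).length : Int),
             (p.2.filter (fun w => PySem.Set.contains pool w)).foldl
               (fun ix w => ix.modify w [] (· ++ [p.1])) pr.2)) st.2 p)) from rfl]
  rw [PySem.List.foldl_prod_mk
    (f := fun (m : PySem.Dict String (List String)) (p : String × List String) =>
      m.insert p.1 (p.2.filter (fun w => PySem.Set.contains pool w)))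
    (g := fun (pr : PySem.Dict String Int × PySem.Dict String (List String))
        (p : String × List String) =>
      (pr.1.insert p.1 ((p.2.filter (fun w => PySem.Set.contains pool w)).length : Int),
       (p.2.filter (fun w => PySem.Set.contains pool w)).foldl
         (fun ix w => ix.modify w [] (· ++ [p.1])) pr.2))]
  rw [PySem.List.foldl_prod_mk
    (f := fun (c : PySem.Dict String Int) (p : String × List String) =>
      c.insert p.1 ((p.2.filter (fun w => PySem.Set.contains pool w)).length : Int))
    (g := fun (ix : PySem.Dict String (List String)) (p : String × List String) =>
      (p.2.filter (fun w => PySem.Set.contains pool w)).foldl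
        (fun ix w => ix.modify w [] (· ++ [p.1])) ix)]
  dsimp only
  -- members
  have hkm : (d.items.map Prod.fst).Nodup := by
    simpa [PySem.Dict.keys] using hnd0
  have hmembers : (d.items.foldl (fun m (p : String × List String) =>
        m.insert p.1 (p.2.filter (fun w => PySem.Set.contains pool w))) PySem.Dict.empty)
      = mkMap d.keys (pvMem d pool) := by
    apply PySem.Dict.ext
    rw [PySem.Dict.items_foldl_insert_fresh d.items Prod.fst
      (fun p => p.2.filter (fun w => PySem.Set.contains pool w)) PySem.Dict.empty
      (fun a _ => PySem.Dict.contains_empty _) hkm]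
    rw [hitems]
    simp [mkMap, PySem.Dict.items, PySem.Dict.empty, List.map_map, Function.comp, pvMem]
  -- count
  have hcount : (d.items.foldl (fun c (p : String × List String) =>
        c.insert p.1 ((p.2.filter (fun w => PySem.Set.contains pool w)).length : Int)) PySem.Dict.empty)
      = mkMap d.keys (fun u => ((pvMem d pool u).length : Int)) := by
    apply PySem.Dict.ext
    rw [PySem.Dict.items_foldl_insert_fresh d.items Prod.fst
      (fun p => ((p.2.filter (fun w => PySem.Set.contains pool w)).length : Int)) PySem.Dict.empty
      (fun a _ => PySem.Dict.contains_empty _) hkm]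
    rw [hitems]
    simp [mkMap, PySem.Dict.items, PySem.Dict.empty, List.map_map, Function.comp, pvMem]
  -- index
  have hindex : ∀ w, ((d.items.foldl (fun ix (p : String × List String) =>
        (p.2.filter (fun w => PySem.Set.contains pool w)).foldl
          (fun ix w => ix.modify w [] (· ++ [p.1])) ix) PySem.Dict.empty)).getD w []
      = d.keys.filter (fun u => decide (w ∈ pvMem d pool u)) := by
    intro w
    have hsplit : (d.items.foldl (fun ix (p : String × List String) =>
          (p.2.filter (fun w => PySem.Set.contains pool w)).foldl
            (fun ix w => ix.modify w [] (· ++ [p.1])) ix) PySem.Dict.empty)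
        = ((d.items.flatMap (fun p =>
            (p.2.filter (fun w => PySem.Set.contains pool w)).map (fun x => (x, p.1)))).foldl
          (fun ix q => ix.modify q.1 [] (· ++ [q.2])) PySem.Dict.empty) := by
      rw [List.foldl_flatMap]
      refine (PySem.List.foldl_congr_mem _ _ _ _ ?_).symm
      intro acc p _
      rw [List.foldl_map]
    rw [hsplit, PySem.Dict.getD_foldl_modify_append]
    simp only [PySem.Dict.getD_empty, List.nil_append]
    rw [hitems]
    rw [List.flatMap_map]
    induction d.keys with
    | nil => rfl
    | cons k ks ihk =>
      simp only [List.flatMap_cons, List.filter_append, List.map_append, List.filter_cons, ihk]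
      congr 1
      simp only [List.filter_map, List.map_map]
      rw [show List.filter (fun w => PySem.Set.contains pool w) (d.getD k []) = pvMem d pool k
        from rfl]
      by_cases hw : w ∈ pvMem d pool k
      · have hdec : decide (w ∈ pvMem d pool k) = true := by simp [hw]
        rw [hdec, if_pos rfl]
        have h1 : (pvMem d pool k).filter ((fun q : String × String => q.1 == w) ∘ (fun x => (x, k)))
            = [w] := by
          have h2 : (pvMem d pool k).filter ((fun q : String × String => q.1 == w) ∘ (fun x => (x, k)))
              = (pvMem d pool k).filter (fun x => x == w) := by
            apply List.filter_congr; intro x _; rfl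
          rw [h2, List.filter_beq, List.count_eq_one_of_mem (hmemnd k) hw]
          rfl
        rw [h1]
        rfl
      · have hdec : decide (w ∈ pvMem d pool k) = false := by simp [hw]
        rw [hdec, if_neg (by simp)]
        have h1 : (pvMem d pool k).filter ((fun q : String × String => q.1 == w) ∘ (fun x => (x, k)))
            = [] := by
          rw [List.filter_eq_nil_iff]
          intro x hx
          simp only [Function.comp]
          have : x ≠ w := fun he => hw (he ▸ hx)
          simp [this]
        rw [h1]
        rfl
  rw [hmembers, hcount]
  -- alive
  have halive : PySem.Dict.ofList (pool.map (fun w => (w, true))) = pvAlive pool pool := by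
    apply PySem.Dict.ext
    have : (PySem.Dict.ofList (pool.map (fun w => (w, true)))).items
        = PySem.Dict.empty.items ++ (pool.map (fun w => (w, true))).map (fun p => (p.1, p.2)) := by
      rw [show PySem.Dict.ofList (pool.map (fun w => (w, true)))
          = (pool.map (fun w => (w, true))).foldl (fun acc p => acc.insert p.1 p.2) PySem.Dict.empty
          from rfl]
      exact PySem.Dict.items_foldl_insert_fresh _ Prod.fst Prod.snd _
        (fun a _ => PySem.Dict.contains_empty _)
        (by simpa [Function.comp_def] using hpoolnd)
    rw [this]
    simp only [PySem.Dict.empty, List.nil_append, List.map_map]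
    simp only [pvAlive, mkMap, PySem.Dict.items]
    apply List.map_congr_left
    intro w hw
    simp [Function.comp, hw]
  rw [halive]
  -- initial count = tabulation of |inter (mem u) pool|
  have hcnt0 : mkMap d.keys (fun u => ((pvMem d pool u).length : Int))
      = mkMap d.keys (fun u => ((PySem.Set.inter (pvMem d pool u) pool).length : Int)) := by
    apply mkMap_congr
    intro k _
    congr 2
    symm
    rw [PySem.Set.inter, List.filter_eq_self]
    intro x hx
    simp only [pvMem, List.mem_filter] at hx
    exact hx.2
  have hfuel : (mkMap d.keys (fun u => ((pvMem d pool u).length : Int))).size = d.keys.length :=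
    mkMap_size _ _
  rw [hfuel, hcnt0]
  rw [bLoop_eq d pool d.keys (mkMap d.keys (pvMem d pool)) _ hnd0
    (fun u hu => mkMap_getD _ _ _ _ hu) hindex hmemnd d.keys.length [] d.keys pool
    (fun _ h => h) hpoolnd (fun _ h => h)]

-- ===== VERDICT (by name: the statement is the Claim_ definition above) =====
theorem compute_contributions_spec : Claim_equal_compute_contributions := by
  intro url_to_words words _
  unfold Spec_compute_contributions
  exact pv_main url_to_words words
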